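-- pv_equiv track=rewrite | github.com/Setsushin/Academic-Archives | LUT_Decomposition_algorithm/src/MLUT_modules_added.py | find_best_loss
-- ===== SOURCE A (Python) =====
-- def calculate_loss(data, record, bit):
--     sorted_record = sorted(record, key=lambda x:x[1], reverse=True) # Descending order
--     num_of_outputs = len(data)
--     rest_output_individuals = 0
--     for index in range(2**bit):
--         rest_output_individuals += sorted_record[index][1]
--     return rest_output_individuals, num_of_outputs - rest_output_individuals
--
-- def find_best_loss(record_of_output, data, N):
--     current_total_bit = N
--     output_individuals = len(record_of_output)
--     result = []
--
--     while current_total_bit >= 1: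
--         if output_individuals <= 2**current_total_bit:
--             result.append((len(data), 0))
--             current_total_bit -= 1
--         else:
--             correct, loss = calculate_loss(data = data, record = record_of_output, bit = current_total_bit)
--             result.append((correct, loss))
--             current_total_bit -= 1
--
--     return result
-- ===== SOURCE B (Python) =====
-- def find_best_loss(record_of_output, data, N):
--     # Sort the values once and build prefix sums; each bit level is then an O(1) step.
--     # Levels with 2**bit >= M are recognised by bit_length, so no huge powers are ever computed.
--     M = len(record_of_output)
--     D = len(data)
--     vals = sorted((v for _, v in record_of_output), reverse=True)
--     prefix = [0]
--     acc = 0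
--     for v in vals:
--         acc += v
--         prefix.append(acc)
--     t = (M - 1).bit_length() if M > 1 else 0   # smallest bit with M <= 2**bit
--     result = []
--     for bit in range(N, 0, -1):
--         if bit >= t:
--             result.append((D, 0))
--         else:
--             c = prefix[2 ** bit]
--             result.append((c, D - c))
--     return result
-- ===== Notes on version B (the rewrite author's own statement) =====
-- stated objective: faster
-- what changed: B sorts the record's values once and builds prefix sums so each bit level is an O(1) lookup, and uses bit_length to decide M <= 2**bit so no large powers of two are ever computed, instead of A's per-level full sort plus top-2^bit summation.
import Mathlib
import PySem

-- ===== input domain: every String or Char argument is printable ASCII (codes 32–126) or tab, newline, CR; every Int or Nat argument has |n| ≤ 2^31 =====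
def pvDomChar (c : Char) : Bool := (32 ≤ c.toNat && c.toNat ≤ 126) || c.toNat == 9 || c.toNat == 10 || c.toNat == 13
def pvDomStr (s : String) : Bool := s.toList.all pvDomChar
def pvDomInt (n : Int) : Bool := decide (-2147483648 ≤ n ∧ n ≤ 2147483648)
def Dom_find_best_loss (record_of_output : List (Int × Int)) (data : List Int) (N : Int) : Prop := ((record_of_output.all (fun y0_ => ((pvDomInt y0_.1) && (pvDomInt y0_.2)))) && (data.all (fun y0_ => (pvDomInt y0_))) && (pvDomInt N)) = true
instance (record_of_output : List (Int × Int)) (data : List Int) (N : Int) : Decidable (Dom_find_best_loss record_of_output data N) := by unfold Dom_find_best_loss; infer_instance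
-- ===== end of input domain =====

-- B sorts the record's values once and uses prefix sums, so each bit level is one lookup instead of A's per-level sort and summation.

-- ===== PORT A =====
-- sorted_record[index] is always in range at A's call sites (2^bit < len(record)); pyGetD's default is never read.
def calculate_loss (data : List Int) (record : List (Int × Int)) (bit : Int) : Int × Int :=
  let sorted_record := PySem.List.sorted record (fun x => x.2) true
  let num_of_outputs : Int := (data.length : Int)
  let rest := (PySem.List.pyRange 0 ((2:Int) ^ bit.toNat) 1).foldl
    (fun acc index => acc + (PySem.List.pyGetD sorted_record index (0, 0)).2) 0
  (rest, num_of_outputs - rest)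

-- A's while loop, bit counting down from N to 1 (fuel = current bit)
def fblLoopA (record_of_output : List (Int × Int)) (data : List Int) : Nat → List (Int × Int)
  | 0 => []
  | b + 1 =>
    (if (record_of_output.length : Int) ≤ (2:Int) ^ (b + 1) then ((data.length : Int), 0)
     else calculate_loss data record_of_output ((b : Int) + 1)) :: fblLoopA record_of_output data b

def find_best_loss (record_of_output : List (Int × Int)) (data : List Int) (N : Int) : List (Int × Int) :=
  fblLoopA record_of_output data N.toNat

-- ===== PORT B =====
-- Source B's prefix-building loop (running sum acc), as structural recursion over vals
def fblScan (a : Int) : List Int → List Int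
  | [] => []
  | v :: vs => (a + v) :: fblScan (a + v) vs

-- Source B's loop 'for bit in range(N, 0, -1)' (fuel = current bit); t is the bit_length threshold
def fblLoopB (t D : Int) (pfx : List Int) : Nat → List (Int × Int)
  | 0 => []
  | b + 1 =>
    (if t ≤ (b : Int) + 1 then (D, 0)
     else
       let c := PySem.List.pyGetD pfx ((2:Int) ^ (b + 1)) 0
       (c, D - c)) :: fblLoopB t D pfx b

def find_best_loss_alt (record_of_output : List (Int × Int)) (data : List Int) (N : Int) : List (Int × Int) :=
  let M : Int := (record_of_output.length : Int)
  let D : Int := (data.length : Int)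
  let vals := PySem.List.sorted (record_of_output.map Prod.snd) (fun v => v) true
  let pfx := 0 :: fblScan 0 vals
  let t : Int := if 1 < M then (PySem.Int.bitLength (M - 1) : Int) else 0
  fblLoopB t D pfx N.toNat

-- ===== PRECONDITION & SPEC =====
def Spec_find_best_loss (record_of_output : List (Int × Int)) (data : List Int) (N : Int) (out : List (Int × Int)) : Prop := out = find_best_loss_alt record_of_output data N
instance (record_of_output : List (Int × Int)) (data : List Int) (N : Int) (out : List (Int × Int)) : Decidable (Spec_find_best_loss record_of_output data N out) := by unfold Spec_find_best_loss; infer_instance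

-- ===== CLAIM (what is proved, stated in full; the proofs are below) =====
def Claim_equal_find_best_loss : Prop := ∀ (record_of_output : List (Int × Int)) (data : List Int) (N : Int), Dom_find_best_loss record_of_output data N → Spec_find_best_loss record_of_output data N (find_best_loss record_of_output data N)

-- ===== LEMMAS AND PROOFS =====

-- the snd-projection of A's per-level descending sort is B's once-sorted value list
lemma map_snd_sorted_rev (record : List (Int × Int)) :
    (PySem.List.sorted record (fun x => x.2) true).map Prod.snd
      = PySem.List.sorted (record.map Prod.snd) (fun v => v) true := by
  refine List.Perm.eq_of_pairwise (le := fun a b : Int => b ≤ a)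
    (fun a b _ _ h1 h2 => le_antisymm h2 h1)
    ((PySem.List.sorted_pairwise_rev record (fun x => x.2)).map _ (fun _ _ h => h))
    (PySem.List.sorted_pairwise_rev (record.map Prod.snd) (fun v => v))
    (((PySem.List.sorted_perm record (fun x => x.2) true).map Prod.snd).trans
      (PySem.List.sorted_perm (record.map Prod.snd) (fun v => v) true).symm)

-- indexing the 0-rooted scan is the partial sum
lemma fblScan_getD (vals : List Int) (K : Nat) (a : Int) (hK : K ≤ vals.length) :
    (a :: fblScan a vals).getD K 0 = a + (vals.take K).sum := by
  induction vals generalizing K a with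
  | nil => simp_all
  | cons v vs ih =>
    cases K with
    | zero => simp
    | succ k =>
      simp only [fblScan, List.getD_cons_succ, List.take_succ_cons, List.sum_cons]
      rw [ih k (a + v) (by simpa using hK)]; ring

-- A's inner range-loop sum is the sum of the first K sorted values
lemma calc_sum (xs : List (Int × Int)) (K : Nat) (hK : K ≤ xs.length) :
    (PySem.List.pyRange 0 ((K : Nat) : Int) 1).foldl
        (fun acc index => acc + (PySem.List.pyGetD xs index (0, 0)).2) 0
      = ((xs.take K).map Prod.snd).sum := by
  have hlen : (xs.take K).length = K := by simp [Nat.min_eq_left hK]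
  have hcongr : (PySem.List.pyRange 0 ((K : Nat) : Int) 1).foldl
        (fun acc index => acc + (PySem.List.pyGetD xs index (0, 0)).2) 0
      = (PySem.List.pyRange 0 ((K : Nat) : Int) 1).foldl
        (fun acc index => acc + (PySem.List.pyGetD (xs.take K) index (0, 0)).2) 0 := by
    apply PySem.List.foldl_congr_mem
    intro acc i hi
    rw [PySem.List.mem_pyRange_one] at hi
    have hiK : i < ((xs.take K).length : Int) := by rw [hlen]; exact hi.2
    have hixs : i < (xs.length : Int) := by
      have : (K : Int) ≤ (xs.length : Int) := by exact_mod_cast hK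
      omega
    rw [PySem.List.pyGetD_eq_getElem xs (0, 0) hi.1 hixs,
        PySem.List.pyGetD_eq_getElem (xs.take K) (0, 0) hi.1 hiK,
        List.getElem_take]
  rw [hcongr]
  have hb : ((K : Nat) : Int) = ((xs.take K).length : Int) := by rw [hlen]
  rw [hb, PySem.List.foldl_pyRange_zero_pyGetD' (xs.take K) (0, 0) (fun acc x => acc + x.2) 0,
      List.sum_eq_foldl, List.foldl_map]

-- A's comparison 'M <= 2**bit' is exactly Source B's threshold test 'bit >= t'
lemma cond_iff (Mn b : Nat) :
    ((Mn : Int) ≤ (2:Int) ^ (b + 1))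
      ↔ ((if 1 < (Mn : Int) then (PySem.Int.bitLength ((Mn : Int) - 1) : Int) else 0) ≤ (b : Int) + 1) := by
  by_cases hM2 : 2 ≤ Mn
  · have h1lt : 1 < (Mn : Int) := by exact_mod_cast hM2
    rw [if_pos h1lt]
    have hMc : (Mn : Int) - 1 = ((Mn - 1 : Nat) : Int) := by omega
    rw [hMc]
    set L := PySem.Int.bitLength ((Mn - 1 : Nat) : Int) with hL
    have h1 : Mn - 1 < 2 ^ L := by
      have := PySem.Int.lt_two_pow_bitLength ((Mn - 1 : Nat) : Int)
      simpa using this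
    have h2 : 2 ^ (L - 1) ≤ Mn - 1 := by
      have := PySem.Int.two_pow_bitLength_le ((Mn - 1 : Nat) : Int)
        (by exact_mod_cast (by omega : (Mn - 1 : Nat) ≠ 0))
      simpa using this
    have hpow : ((2:Int) ^ (b + 1)) = ((2 ^ (b + 1) : Nat) : Int) := by norm_cast
    rw [hpow]
    constructor
    · intro h
      by_contra hc
      have hbL : b + 1 ≤ L - 1 := by omega
      have : 2 ^ (b + 1) ≤ 2 ^ (L - 1) := Nat.pow_le_pow_right (by omega) hbL
      have hMle : Mn ≤ 2 ^ (b + 1) := by exact_mod_cast h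
      omega
    · intro h
      have hLb : L ≤ b + 1 := by omega
      have : 2 ^ L ≤ 2 ^ (b + 1) := Nat.pow_le_pow_right (by omega) hLb
      exact_mod_cast (by omega : Mn ≤ 2 ^ (b + 1))
  · have hMle : (Mn : Int) ≤ 1 := by exact_mod_cast (by omega : Mn ≤ 1)
    have h1 : ¬ (1 : Int) < (Mn : Int) := by omega
    rw [if_neg h1]
    have : (1 : Int) ≤ (2:Int) ^ (b + 1) := one_le_pow₀ (by omega)
    constructor <;> intro <;> [omega; omega]

-- the two bit-level loops agree level by level
lemma loop_eq (record : List (Int × Int)) (data : List Int) (n : Nat) :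
    fblLoopA record data n
      = fblLoopB (if 1 < (record.length : Int) then (PySem.Int.bitLength ((record.length : Int) - 1) : Int) else 0)
          (data.length : Int)
          (0 :: fblScan 0 (PySem.List.sorted (record.map Prod.snd) (fun v => v) true)) n := by
  induction n with
  | zero => rfl
  | succ b ih =>
    simp only [fblLoopA, fblLoopB, ih]
    congr 1
    by_cases hM : (record.length : Int) ≤ (2:Int) ^ (b + 1)
    · rw [if_pos hM, if_pos ((cond_iff record.length b).mp hM)]
    · rw [if_neg hM, if_neg (fun hc => hM ((cond_iff record.length b).mpr hc))]
      set vals := PySem.List.sorted (record.map Prod.snd) (fun v => v) true with hvals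
      set K : Nat := 2 ^ (b + 1) with hKdef
      have hcast : (2:Int) ^ (b + 1) = ((K : Nat) : Int) := by push_cast [hKdef]; ring
      have hKlt : K ≤ record.length := by
        have : ((K : Nat) : Int) < (record.length : Int) := by rw [← hcast]; omega
        exact_mod_cast this.le
      have hlen_sorted : (PySem.List.sorted record (fun x => x.2) true).length = record.length :=
        (PySem.List.sorted_perm record (fun x => x.2) true).length_eq
      have hvlen : vals.length = record.length := by
        rw [hvals, (PySem.List.sorted_perm (record.map Prod.snd) (fun v => v) true).length_eq,
            List.length_map]
      simp only [calculate_loss]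
      have hbit : ((b : Int) + 1).toNat = b + 1 := by omega
      rw [hbit, hcast,
          calc_sum (PySem.List.sorted record (fun x => x.2) true) K (hlen_sorted ▸ hKlt),
          PySem.List.pyGetD_natCast, fblScan_getD vals K 0 (hvlen ▸ hKlt),
          List.map_take, map_snd_sorted_rev, ← hvals, zero_add]

-- ===== VERDICT (by name: the statement is the Claim_ definition above) =====
theorem find_best_loss_spec : Claim_equal_find_best_loss := by
  intro record data N _
  unfold Spec_find_best_loss find_best_loss find_best_loss_alt
  exact loop_eq record data N.toNat
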